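-- pv_equiv track=rewrite | github.com/IlliaJa/SC | task1.py | args_are_similar
-- ===== SOURCE A (Python) =====
-- def args_are_similar(str1, str2):
--     def get_char_counts(input_str):
--         res = {}
--         for char in input_str:
--             if input_str in res:
--                 res[char] += 1
--             else:
--                 res[char] = 1
--         return res
--     return get_char_counts(str1) == get_char_counts(str2)
-- ===== SOURCE B (Python) =====
-- def args_are_similar(str1, str2):
--     return all(c in str2 for c in str1) and all(c in str1 for c in str2)
-- ===== Notes on version B (the rewrite author's own statement) =====
-- stated objective: simpler
-- what changed: B replaces A's per-string frequency-dict construction and dict comparison (whose count-increment branch is dead, so A really tests equality of distinct-character sets) by two direct membership scans: every char of each string must occur in the other.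
import Mathlib
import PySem

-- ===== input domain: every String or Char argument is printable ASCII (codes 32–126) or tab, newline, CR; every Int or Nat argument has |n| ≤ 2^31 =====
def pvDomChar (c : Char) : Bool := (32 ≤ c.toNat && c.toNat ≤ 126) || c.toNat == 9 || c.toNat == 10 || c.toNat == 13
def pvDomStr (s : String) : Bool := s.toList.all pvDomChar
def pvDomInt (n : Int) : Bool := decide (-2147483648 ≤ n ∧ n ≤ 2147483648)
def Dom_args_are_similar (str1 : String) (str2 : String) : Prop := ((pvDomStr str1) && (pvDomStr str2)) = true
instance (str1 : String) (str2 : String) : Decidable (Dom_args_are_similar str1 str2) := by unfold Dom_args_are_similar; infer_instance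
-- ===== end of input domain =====

-- B replaces A's frequency-dict build (dead count branch) and dict comparison by two direct
-- membership scans (every char of each string occurs in the other); simpler, not faster.


-- ===== PORT A =====
-- Python 'input_str in res': res's keys are 1-char strings, so this is true iff input_str
-- is a single char that is already a key (exact containment test on the dict's keys).
def pvStrInKeys (s : List Char) (res : PySem.Dict Char Int) : Bool :=
  match s with
  | [c] => res.contains c
  | _ => false

-- the inner def get_char_counts; 'res[char] += 1' ported as modify (key present whenever the branch fires)
def pvGetCharCounts (s : List Char) : PySem.Dict Char Int :=
  s.foldl (fun res c =>
    if pvStrInKeys s res then res.modify c 0 (· + 1) else res.insert c 1) PySem.Dict.empty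

-- Python dict '==' ignores insertion order: same key set with equal values
def pvDictEq (d1 d2 : PySem.Dict Char Int) : Bool :=
  d1.keys.all (fun k => d1.get? k == d2.get? k) && d2.keys.all (fun k => d2.get? k == d1.get? k)

def args_are_similar (str1 : String) (str2 : String) : Bool :=
  pvDictEq (pvGetCharCounts str1.toList) (pvGetCharCounts str2.toList)

-- ===== PORT B =====
def args_are_similar_alt (str1 : String) (str2 : String) : Bool :=
  str1.toList.all (fun c => str2.toList.contains c) &&
  str2.toList.all (fun c => str1.toList.contains c)

-- ===== PRECONDITION & SPEC =====
def Spec_args_are_similar (str1 : String) (str2 : String) (out : Bool) : Prop := out = args_are_similar_alt str1 str2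
instance (str1 : String) (str2 : String) (out : Bool) : Decidable (Spec_args_are_similar str1 str2 out) := by unfold Spec_args_are_similar; infer_instance

-- ===== CLAIM (what is proved, stated in full; the proofs are below) =====
def Claim_equal_args_are_similar : Prop := ∀ (str1 : String) (str2 : String), Dom_args_are_similar str1 str2 → Spec_args_are_similar str1 str2 (args_are_similar str1 str2)

-- ===== LEMMAS AND PROOFS =====

-- the 'input_str in res' branch never fires: the foldl is a plain insert-1 loop
theorem pvGetCharCounts_eq_insert_loop (s : List Char) :
    pvGetCharCounts s = s.foldl (fun d c => d.insert c 1) PySem.Dict.empty := by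
  match s with
  | [] => rfl
  | [c] => simp [pvGetCharCounts, pvStrInKeys, List.foldl]
  | a :: b :: t => simp [pvGetCharCounts, pvStrInKeys]

theorem get?_insert_loop (s : List Char) (d : PySem.Dict Char Int) (c : Char) :
    (s.foldl (fun d c => d.insert c 1) d).get? c = if c ∈ s then some 1 else d.get? c := by
  induction s generalizing d with
  | nil => simp
  | cons a t ih =>
    simp only [List.foldl_cons, ih, PySem.Dict.get?_insert, List.mem_cons]
    by_cases h : c ∈ t <;> by_cases h2 : c = a <;> simp [h, h2]

theorem get?_pvGetCharCounts (s : List Char) (c : Char) :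
    (pvGetCharCounts s).get? c = if c ∈ s then some 1 else none := by
  rw [pvGetCharCounts_eq_insert_loop, get?_insert_loop]
  simp [PySem.Dict.get?_empty]

theorem keys_pvGetCharCounts (s : List Char) :
    (pvGetCharCounts s).keys = PySem.Set.ofList s := by
  rw [pvGetCharCounts_eq_insert_loop, PySem.Dict.keys_foldl_insert]
  simp [PySem.Set.ofList, PySem.Set.update]

theorem pvDictEq_half (s t : List Char) :
    (pvGetCharCounts s).keys.all
        (fun k => (pvGetCharCounts s).get? k == (pvGetCharCounts t).get? k)
      = s.all (fun c => t.contains c) := by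
  rw [Bool.eq_iff_iff]
  simp only [List.all_eq_true, keys_pvGetCharCounts, PySem.Set.mem_ofList,
    get?_pvGetCharCounts, List.contains_eq_mem, beq_iff_eq, decide_eq_true_eq]
  constructor
  · intro h c hc
    have := h c hc
    simp only [if_pos hc] at this
    by_cases ht : c ∈ t
    · exact ht
    · simp [ht] at this
  · intro h c hc
    simp [if_pos hc, if_pos (h c hc)]

-- ===== VERDICT (by name: the statement is the Claim_ definition above) =====
theorem args_are_similar_spec : Claim_equal_args_are_similar := by
  intro str1 str2 _
  unfold Spec_args_are_similar args_are_similar args_are_similar_alt pvDictEq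
  rw [pvDictEq_half str1.toList str2.toList, pvDictEq_half str2.toList str1.toList]
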